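-- pv_equiv track=rewrite | github.com/LoreEkz/AI_Harmonic_Continuation | Tests/ai_interactive_music21_mood.py | suggest_next
-- ===== SOURCE A (Python) =====
-- FUNCTIONS = {
--     "C": "tonic", "Am": "tonic", "Em": "tonic",
--     "F": "predominant", "Dm": "predominant",
--     "G": "dominant", "Bdim": "dominant",
-- }
--
-- MOOD_BY_FUNCTION = {
--     "tonic": "stable / floating",
--     "predominant": "gentle motion",
--     "dominant": "tension / drive",
-- }
--
-- RESOLUTION_MAP = {
--     "dominant": ["tonic"],
--     "predominant": ["dominant"],
--     "tonic": ["predominant", "dominant"]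
-- }
--
-- KEY_CHORDS = ["C", "Dm", "Em", "F", "G", "Am", "Bdim"]
--
-- def strip_extension(ch):
--     return ch.replace("7", "").replace("9", "")
--
-- def get_function(ch):
--     return FUNCTIONS.get(strip_extension(ch), "tonic")
--
-- def get_mood(ch):
--     return MOOD_BY_FUNCTION[get_function(ch)]
--
-- def suggest_next(prev_chord, mood_filter):
--     prev_func = get_function(prev_chord)
--     target_funcs = RESOLUTION_MAP.get(prev_func, ["tonic"])
--
--     candidates = []
--     for ch in KEY_CHORDS:
--         if get_function(ch) in target_funcs:
--             mood = get_mood(ch)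
--             if mood_filter != "mixed" and mood != mood_filter:
--                 continue
--             candidates.append(ch)
--
--     # fallback if mood filter too strict
--     if not candidates:
--         for ch in KEY_CHORDS:
--             if get_function(ch) in target_funcs:
--                 candidates.append(ch)
--
--     return candidates
-- ===== SOURCE B (Python) =====
-- MOOD_BY_FUNCTION = {
--     "tonic": "stable / floating",
--     "predominant": "gentle motion",
--     "dominant": "tension / drive",
-- }
--
-- RESOLUTION_MAP = {
--     "dominant": ["tonic"],
--     "predominant": ["dominant"],
--     "tonic": ["predominant", "dominant"]
-- }
--
-- FUNCTIONS = {
--     "C": "tonic", "Am": "tonic", "Em": "tonic",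
--     "F": "predominant", "Dm": "predominant",
--     "G": "dominant", "Bdim": "dominant",
-- }
--
-- # Diatonic chords grouped by harmonic function, each group in KEY_CHORDS order.
-- CHORDS_BY_FUNCTION = {
--     "tonic": ["C", "Em", "Am"],
--     "predominant": ["Dm", "F"],
--     "dominant": ["G", "Bdim"],
-- }
--
-- def strip_extension(ch):
--     return ch.replace("7", "").replace("9", "")
--
-- def get_function(ch):
--     return FUNCTIONS.get(strip_extension(ch), "tonic")
--
-- def suggest_next(prev_chord, mood_filter):
--     # Work at the function level: every chord of a function class shares one
--     # mood, so select the matching target functions and concatenate their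
--     # precomputed chord groups — no scan of KEY_CHORDS at all.
--     target_funcs = RESOLUTION_MAP.get(get_function(prev_chord), ["tonic"])
--     if mood_filter != "mixed":
--         matched = [f for f in target_funcs if MOOD_BY_FUNCTION[f] == mood_filter]
--         if matched:
--             target_funcs = matched
--     return [ch for f in target_funcs for ch in CHORDS_BY_FUNCTION[f]]
-- ===== Notes on version B (the rewrite author's own statement) =====
-- stated objective: alternative
-- what changed: B never scans KEY_CHORDS: it reasons at the harmonic-function level (each function class has exactly one mood), narrowing the target-function list by mood and concatenating precomputed per-function chord groups, instead of A's per-chord scans with get_function/get_mood calls and an explicit fallback rescan.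
import Mathlib
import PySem

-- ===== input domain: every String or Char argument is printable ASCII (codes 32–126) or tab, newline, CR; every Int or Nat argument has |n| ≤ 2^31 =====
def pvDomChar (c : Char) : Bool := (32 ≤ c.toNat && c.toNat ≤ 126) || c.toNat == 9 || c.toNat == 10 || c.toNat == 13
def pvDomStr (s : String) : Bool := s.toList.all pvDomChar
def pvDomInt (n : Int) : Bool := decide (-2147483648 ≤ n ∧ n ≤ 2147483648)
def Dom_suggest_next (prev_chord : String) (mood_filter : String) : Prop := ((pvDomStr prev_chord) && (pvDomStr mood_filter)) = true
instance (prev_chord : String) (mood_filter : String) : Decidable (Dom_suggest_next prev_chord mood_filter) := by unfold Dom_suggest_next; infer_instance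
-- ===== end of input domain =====

-- B works at the function level: it selects the target harmonic functions (optionally
-- narrowed by mood, since each function class has one mood) and concatenates their
-- precomputed chord groups, instead of A's per-chord scans of KEY_CHORDS (alternative).

-- ===== PORT A =====
def FUNCTIONS : PySem.Dict String String :=
  PySem.Dict.ofList [("C", "tonic"), ("Am", "tonic"), ("Em", "tonic"),
    ("F", "predominant"), ("Dm", "predominant"),
    ("G", "dominant"), ("Bdim", "dominant")]

def MOOD_BY_FUNCTION : PySem.Dict String String :=
  PySem.Dict.ofList [("tonic", "stable / floating"),
    ("predominant", "gentle motion"), ("dominant", "tension / drive")]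

def RESOLUTION_MAP : PySem.Dict String (List String) :=
  PySem.Dict.ofList [("dominant", ["tonic"]), ("predominant", ["dominant"]),
    ("tonic", ["predominant", "dominant"])]

def KEY_CHORDS : List String := ["C", "Dm", "Em", "F", "G", "Am", "Bdim"]

def strip_extension (ch : String) : String :=
  PySem.Str.replace (PySem.Str.replace ch "7" "") "9" ""

def get_function (ch : String) : String :=
  PySem.Dict.getD FUNCTIONS (strip_extension ch) "tonic"

-- exact: get_function always returns a key present in MOOD_BY_FUNCTION, so Python's [] never raises
def get_mood (ch : String) : String :=
  (PySem.Dict.get? MOOD_BY_FUNCTION (get_function ch)).getD ""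

def suggest_next (prev_chord : String) (mood_filter : String) : List String :=
  let prev_func := get_function prev_chord
  let target_funcs := (PySem.Dict.get? RESOLUTION_MAP prev_func).getD ["tonic"]
  let candidates := KEY_CHORDS.foldl (fun acc ch =>
    if target_funcs.contains (get_function ch) then
      if mood_filter ≠ "mixed" ∧ get_mood ch ≠ mood_filter then acc
      else acc ++ [ch]
    else acc) []
  if candidates.isEmpty then
    KEY_CHORDS.foldl (fun acc ch =>
      if target_funcs.contains (get_function ch) then acc ++ [ch] else acc) []
  else candidates

-- ===== PORT B =====
def CHORDS_BY_FUNCTION : PySem.Dict String (List String) :=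
  PySem.Dict.ofList [("tonic", ["C", "Em", "Am"]),
    ("predominant", ["Dm", "F"]), ("dominant", ["G", "Bdim"])]

-- exact: every f drawn from RESOLUTION_MAP's values is a key of both dicts, so Python's [] never raises
def suggest_next_alt (prev_chord : String) (mood_filter : String) : List String :=
  let target_funcs := (PySem.Dict.get? RESOLUTION_MAP (get_function prev_chord)).getD ["tonic"]
  let target_funcs :=
    if mood_filter ≠ "mixed" then
      let matched := target_funcs.filter (fun f =>
        (PySem.Dict.get? MOOD_BY_FUNCTION f).getD "" == mood_filter)
      if matched.isEmpty then target_funcs else matched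
    else target_funcs
  target_funcs.flatMap (fun f => (PySem.Dict.get? CHORDS_BY_FUNCTION f).getD [])

-- ===== PRECONDITION & SPEC =====
def Spec_suggest_next (prev_chord : String) (mood_filter : String) (out : List String) : Prop := out = suggest_next_alt prev_chord mood_filter
instance (prev_chord : String) (mood_filter : String) (out : List String) : Decidable (Spec_suggest_next prev_chord mood_filter out) := by unfold Spec_suggest_next; infer_instance

-- ===== CLAIM (what is proved, stated in full; the proofs are below) =====
def Claim_equal_suggest_next : Prop := ∀ (prev_chord : String) (mood_filter : String), Dom_suggest_next prev_chord mood_filter → Spec_suggest_next prev_chord mood_filter (suggest_next prev_chord mood_filter)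

-- ===== LEMMAS AND PROOFS =====

lemma gf_C : get_function "C" = "tonic" := by decide
lemma gf_Dm : get_function "Dm" = "predominant" := by decide
lemma gf_Em : get_function "Em" = "tonic" := by decide
lemma gf_F : get_function "F" = "predominant" := by decide
lemma gf_G : get_function "G" = "dominant" := by decide
lemma gf_Am : get_function "Am" = "tonic" := by decide
lemma gf_Bdim : get_function "Bdim" = "dominant" := by decide

lemma gm_C : get_mood "C" = "stable / floating" := by decide
lemma gm_Dm : get_mood "Dm" = "gentle motion" := by decide
lemma gm_Em : get_mood "Em" = "stable / floating" := by decide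
lemma gm_F : get_mood "F" = "gentle motion" := by decide
lemma gm_G : get_mood "G" = "tension / drive" := by decide
lemma gm_Am : get_mood "Am" = "stable / floating" := by decide
lemma gm_Bdim : get_mood "Bdim" = "tension / drive" := by decide

-- literal lookups used by both bodies
lemma mbf_tonic : (PySem.Dict.get? MOOD_BY_FUNCTION "tonic").getD "" = "stable / floating" := by decide
lemma mbf_pred : (PySem.Dict.get? MOOD_BY_FUNCTION "predominant").getD "" = "gentle motion" := by decide
lemma mbf_dom : (PySem.Dict.get? MOOD_BY_FUNCTION "dominant").getD "" = "tension / drive" := by decide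
lemma cbf_tonic : (PySem.Dict.get? CHORDS_BY_FUNCTION "tonic").getD [] = ["C", "Em", "Am"] := by decide
lemma cbf_pred : (PySem.Dict.get? CHORDS_BY_FUNCTION "predominant").getD [] = ["Dm", "F"] := by decide
lemma cbf_dom : (PySem.Dict.get? CHORDS_BY_FUNCTION "dominant").getD [] = ["G", "Bdim"] := by decide

-- once the target-function list is fixed to one of its three possible values,
-- the two bodies agree
lemma body_eq (target_funcs : List String) (mood_filter : String)
    (h : target_funcs = ["tonic"] ∨ target_funcs = ["dominant"] ∨
         target_funcs = ["predominant", "dominant"]) :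
    (let candidates := KEY_CHORDS.foldl (fun acc ch =>
        if target_funcs.contains (get_function ch) then
          if mood_filter ≠ "mixed" ∧ get_mood ch ≠ mood_filter then acc
          else acc ++ [ch]
        else acc) []
     if candidates.isEmpty then
       KEY_CHORDS.foldl (fun acc ch =>
         if target_funcs.contains (get_function ch) then acc ++ [ch] else acc) []
     else candidates) =
    (let tf :=
       if mood_filter ≠ "mixed" then
         let matched := target_funcs.filter (fun f =>
           (PySem.Dict.get? MOOD_BY_FUNCTION f).getD "" == mood_filter)
         if matched.isEmpty then target_funcs else matched
       else target_funcs
     tf.flatMap (fun f => (PySem.Dict.get? CHORDS_BY_FUNCTION f).getD [])) := by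
  rcases h with h | h | h <;> subst h <;>
    cases h1 : (mood_filter == "mixed") <;>
    cases h2 : ("stable / floating" == mood_filter) <;>
    cases h3 : ("gentle motion" == mood_filter) <;>
    cases h4 : ("tension / drive" == mood_filter) <;>
    simp [KEY_CHORDS, List.foldl_cons, List.foldl_nil,
      List.filter_cons, List.filter_nil, List.flatMap_cons, List.flatMap_nil,
      gf_C, gf_Dm, gf_Em, gf_F, gf_G, gf_Am, gf_Bdim,
      gm_C, gm_Dm, gm_Em, gm_F, gm_G, gm_Am, gm_Bdim,
      mbf_tonic, mbf_pred, mbf_dom, cbf_tonic, cbf_pred, cbf_dom,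
      h1, h2, h3, h4] <;>
    simp_all [beq_iff_eq, cbf_tonic, cbf_pred, cbf_dom]

lemma RESOLUTION_MAP_cases (f : String) :
    ((PySem.Dict.get? RESOLUTION_MAP f).getD ["tonic"] = ["tonic"] ∨
     (PySem.Dict.get? RESOLUTION_MAP f).getD ["tonic"] = ["dominant"] ∨
     (PySem.Dict.get? RESOLUTION_MAP f).getD ["tonic"] = ["predominant", "dominant"]) := by
  have h : RESOLUTION_MAP = PySem.Dict.mk [("dominant", ["tonic"]),
      ("predominant", ["dominant"]), ("tonic", ["predominant", "dominant"])] := by decide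
  rw [h]
  simp [PySem.Dict.get?_mk_cons]
  split_ifs <;> simp [PySem.Dict.get?]

-- ===== VERDICT (by name: the statement is the Claim_ definition above) =====
theorem suggest_next_spec : Claim_equal_suggest_next := by
  intro prev_chord mood_filter _
  unfold Spec_suggest_next suggest_next suggest_next_alt
  exact body_eq _ mood_filter (RESOLUTION_MAP_cases (get_function prev_chord))
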